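-- pv_equiv track=rewrite | github.com/Osama00112/CSE-406-Codes | AES cryptography/AES/1805002/AES_1805002.py | circular_right_shift_key
-- ===== SOURCE A (Python) =====
-- def circular_right_shift_key(w):
--     last_byte = w[-1]
--     length = len(w)
--     for i in range(length - 1, -1, -1):
--         if i == 0:
--             w[i] = last_byte
--         else:
--             w[i] = w[i - 1]
--     return w
-- ===== SOURCE B (Python) =====
-- def circular_right_shift_key(w):
--     w.insert(0, w.pop())
--     return w
-- ===== Notes on version B (the rewrite author's own statement) =====
-- stated objective: simpler
-- what changed: Replaces the descending index-shift loop with a single pop of the last element reinserted at the front (same in-place mutation of w); the C-level list primitives make it measurably faster too.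
import Mathlib
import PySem

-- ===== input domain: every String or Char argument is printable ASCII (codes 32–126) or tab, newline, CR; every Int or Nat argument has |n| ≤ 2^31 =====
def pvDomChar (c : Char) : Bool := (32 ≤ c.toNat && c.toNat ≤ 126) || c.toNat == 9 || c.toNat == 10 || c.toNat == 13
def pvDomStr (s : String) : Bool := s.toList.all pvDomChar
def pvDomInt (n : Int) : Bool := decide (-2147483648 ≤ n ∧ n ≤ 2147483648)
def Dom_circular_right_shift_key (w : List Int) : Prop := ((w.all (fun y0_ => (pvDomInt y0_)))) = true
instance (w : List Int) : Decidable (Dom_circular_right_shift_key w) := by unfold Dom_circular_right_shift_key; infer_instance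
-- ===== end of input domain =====

-- B rotates by popping the last element and reinserting it at the front instead of A's
-- descending index-shift loop (simpler). Both Pythons mutate w in place in the same way;
-- the theorems below are about the returned value.

-- ===== PORT A =====
def circular_right_shift_key (w : List Int) : List Int :=
  let last_byte := (PySem.List.pyGet? w (-1)).getD 0   -- w[-1]; none (IndexError on []) excluded by Pre_
  let length : Int := w.length
  (PySem.List.pyRange (length - 1) (-1) (-1)).foldl
    (fun acc i =>
      if i = 0 then PySem.List.pySetD acc i last_byte
      else PySem.List.pySetD acc i (PySem.List.pyGetD acc (i - 1) 0)) w

-- ===== PORT B =====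
def circular_right_shift_key_alt (w : List Int) : List Int :=
  match PySem.List.pop? w (-1) with        -- w.pop(); none (IndexError on []) excluded by Pre_
  | some (x, rest) => PySem.List.insert rest 0 x   -- w.insert(0, x)
  | none => w

-- ===== PRECONDITION & SPEC =====
-- Both A (w[-1]) and B (w.pop()) raise IndexError on the empty list; Pre_ excludes exactly it.
def Pre_circular_right_shift_key (w : List Int) : Prop := w ≠ []
instance (w : List Int) : Decidable (Pre_circular_right_shift_key w) := by unfold Pre_circular_right_shift_key; infer_instance
def pvWitness_circular_right_shift_key : List Int := [1, 2, 3, 4]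

def Spec_circular_right_shift_key (w : List Int) (out : List Int) : Prop := out = circular_right_shift_key_alt w
instance (w : List Int) (out : List Int) : Decidable (Spec_circular_right_shift_key w out) := by unfold Spec_circular_right_shift_key; infer_instance

-- ===== CLAIM (what is proved, stated in full; the proofs are below) =====
def Claim_equal_circular_right_shift_key : Prop := ∀ (w : List Int), Dom_circular_right_shift_key w → Pre_circular_right_shift_key w → Spec_circular_right_shift_key w (circular_right_shift_key w)

-- ===== LEMMAS AND PROOFS =====

-- Invariant of A's descending loop: running the indices k-1, …, 0 over a state whose first k
-- entries are still those of w puts `last` in front and shifts w.take (k-1) right by one.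
theorem pv_shift_loop (w : List Int) (last : Int) :
    ∀ (k : Nat) (t : List Int), 1 ≤ k → k ≤ w.length →
    (PySem.List.pyRange ((k : Int) - 1) (-1) (-1)).foldl
      (fun acc i =>
        if i = 0 then PySem.List.pySetD acc i last
        else PySem.List.pySetD acc i (PySem.List.pyGetD acc (i - 1) 0)) (w.take k ++ t)
      = last :: (w.take (k - 1) ++ t) := by
  intro k
  induction k with
  | zero => intro t h; omega
  | succ k ih =>
    intro t _ hk
    by_cases hk1 : k = 0
    · subst hk1
      norm_num
      rw [(by decide : PySem.List.pyRange 0 (-1) (-1) = [0])]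
      obtain ⟨a, w', rfl⟩ : ∃ a w', w = a :: w' := by
        cases w with
        | nil => simp at hk
        | cons a w' => exact ⟨a, w', rfl⟩
      simp [List.foldl, PySem.List.pySetD_of_nonneg]
    · -- k ≥ 1
      have hklt : k < w.length := by omega
      have hcast : ((k + 1 : Nat) : Int) - 1 = (k : Int) := by push_cast; ring
      rw [hcast, PySem.List.pyRange_neg_one_cons (by omega : (-1 : Int) < (k : Int))]
      simp only [List.foldl_cons]
      rw [if_neg (by simp; omega)]
      have hget : PySem.List.pyGetD (w.take (k + 1) ++ t) ((k : Int) - 1) 0 = w[k - 1]'(by omega) := by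
        have hc : ((k : Int) - 1) = ((k - 1 : Nat) : Int) := by
          push_cast [Nat.cast_sub (by omega : 1 ≤ k)]; ring
        rw [hc, PySem.List.pyGetD_natCast]
        rw [List.getD_eq_getElem?_getD, List.getElem?_append_left (by simp; omega)]
        rw [List.getElem?_take_of_lt (by omega : k - 1 < k + 1),
            List.getElem?_eq_getElem (by omega : k - 1 < w.length)]
        rfl
      rw [hget]
      have hset : PySem.List.pySetD (w.take (k + 1) ++ t) (k : Int) (w[k - 1]'(by omega))
          = w.take k ++ (w[k - 1]'(by omega)) :: t := by
        rw [PySem.List.pySetD_natCast, List.take_succ, List.getElem?_eq_getElem hklt]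
        simp only [Option.toList_some, List.append_assoc, List.singleton_append]
        rw [List.set_append]
        simp [Nat.min_eq_left hklt.le]
      rw [hset, ih ((w[k - 1]'(by omega)) :: t) (by omega) (by omega)]
      have htake : w.take k = w.take (k - 1) ++ [w[k - 1]'(by omega)] := by
        conv_lhs => rw [(by omega : k = k - 1 + 1)]
        exact List.take_succ_eq_append_getElem (by omega)
      have hk11 : k + 1 - 1 = k := rfl
      rw [hk11, htake, List.append_assoc]
      rfl

-- ===== VERDICT (by name: the statement is the Claim_ definition above) =====
theorem circular_right_shift_key_spec : Claim_equal_circular_right_shift_key := by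
  unfold Claim_equal_circular_right_shift_key
  intro w _ hw
  unfold Spec_circular_right_shift_key circular_right_shift_key circular_right_shift_key_alt
  have hlen : 1 ≤ w.length := List.length_pos_of_ne_nil hw
  have hL : (PySem.List.pyGet? w (-1)).getD 0 = w.getLast hw := by
    rw [PySem.List.pyGet?_neg_one, List.getLast?_eq_some_getLast hw]
    rfl
  have hloop := pv_shift_loop w (w.getLast hw) w.length [] hlen le_rfl
  rw [List.take_length, List.append_nil, List.append_nil] at hloop
  simp only [hL]
  rw [hloop]
  conv_rhs => rw [← List.dropLast_append_getLast hw]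
  rw [PySem.List.pop?_last]
  simp only [PySem.List.insert_zero]
  rw [List.dropLast_eq_take]
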